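-- pv_equiv track=rewrite | github.com/SebastianSteppuhn/FaiLLM | app/refinement.py | _cluster_label_stats
-- ===== SOURCE A (Python) =====
-- def _cluster_label_stats(assignments: list[int], sample_labels: list[str]):
--     """Return (counts_by_cluster, top_label_by_cluster)."""
--     agg: dict[int, dict[str, int]] = {}
--     for c, lab in zip(assignments, sample_labels):
--         lab = lab or ""
--         d = agg.setdefault(c, {})
--         d[lab] = d.get(lab, 0) + 1
--     top = {c: max(d.items(), key=lambda kv: (kv[1], kv[0]))[0] if d else "" for c, d in agg.items()}
--     return agg, top
-- ===== SOURCE B (Python) =====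
-- def _cluster_label_stats(assignments: list[int], sample_labels: list[str]):
--     """Return (counts_by_cluster, top_label_by_cluster).
--
--     Single fused pass: while counting, a running best (count, label) per cluster
--     is maintained with the tie-break (higher count, then lexicographically
--     larger label), so no second max-selection phase over the counts is needed.
--     """
--     agg: dict[int, dict[str, int]] = {}
--     best: dict[int, tuple[int, str]] = {}
--     for c, lab in zip(assignments, sample_labels):
--         lab = lab or ""
--         d = agg.setdefault(c, {})
--         n = d.get(lab, 0) + 1
--         d[lab] = n
--         b = best.get(c)
--         if b is None or (n, lab) > b:
--             best[c] = (n, lab)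
--     return agg, {c: t[1] for c, t in best.items()}
-- ===== Notes on version B (the rewrite author's own statement) =====
-- stated objective: alternative
-- what changed: B fuses counting and max-selection into one pass: instead of counting first and then scanning each cluster's finished count dict with max(), it maintains a running best (count, label) per cluster, updated with the exact (count, then lexicographically larger label) tie-break, and derives the top-label dict from that at the end.
import Mathlib
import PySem

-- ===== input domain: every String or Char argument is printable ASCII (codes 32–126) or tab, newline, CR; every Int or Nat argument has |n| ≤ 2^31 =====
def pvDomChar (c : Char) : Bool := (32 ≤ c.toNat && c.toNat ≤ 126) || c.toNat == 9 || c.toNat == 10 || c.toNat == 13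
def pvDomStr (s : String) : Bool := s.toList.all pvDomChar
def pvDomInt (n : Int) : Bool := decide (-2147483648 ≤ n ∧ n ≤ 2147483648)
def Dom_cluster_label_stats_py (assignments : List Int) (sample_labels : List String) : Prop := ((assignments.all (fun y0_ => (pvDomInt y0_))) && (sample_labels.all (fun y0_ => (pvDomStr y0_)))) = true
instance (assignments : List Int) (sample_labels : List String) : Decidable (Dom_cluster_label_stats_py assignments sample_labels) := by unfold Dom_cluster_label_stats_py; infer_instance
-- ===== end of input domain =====

-- B fuses the counting pass and the per-cluster max-selection into ONE loop with a running
-- best (count, label) per cluster (same tie-break: higher count, then lexicographically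
-- larger label); A counts first and then scans each finished count dict with max().

-- ===== PORT A =====
def cluster_label_stats_py (assignments : List Int) (sample_labels : List String) : (List (Int × List (String × Int))) × (List (Int × String)) :=
  -- for c, lab in zip(...): lab = lab or ""; d = agg.setdefault(c, {}); d[lab] = d.get(lab, 0) + 1
  let agg : PySem.Dict Int (PySem.Dict String Int) :=
    (assignments.zip sample_labels).foldl (fun agg cl =>
      let lab := if cl.2 = "" then "" else cl.2
      let agg1 := agg.setdefault cl.1 PySem.Dict.empty
      let d := (agg1.get? cl.1).getD PySem.Dict.empty
      agg1.insert cl.1 (d.insert lab (d.getD lab 0 + 1))) PySem.Dict.empty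
  -- top = {c: max(d.items(), key=lambda kv: (kv[1], kv[0]))[0] if d else "" for c, d in agg.items()}
  let top : PySem.Dict Int String :=
    agg.items.foldl (fun t p =>
      t.insert p.1 (if p.2.items = [] then ""
        else ((PySem.List.max2? p.2.items (fun kv => kv.2) (fun kv => kv.1)).getD ("", 0)).1)) PySem.Dict.empty
  (agg.items.map (fun p => (p.1, p.2.items)), top.items)

-- ===== PORT B =====
def cluster_label_stats_py_alt (assignments : List Int) (sample_labels : List String) : (List (Int × List (String × Int))) × (List (Int × String)) :=
  -- one pass: count AND maintain a running best (n, lab) per cluster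
  let st :=
    (assignments.zip sample_labels).foldl (fun st cl =>
      let lab := if cl.2 = "" then "" else cl.2
      let agg1 := st.1.setdefault cl.1 PySem.Dict.empty
      let d := (agg1.get? cl.1).getD PySem.Dict.empty
      let n := d.getD lab 0 + 1
      let agg' := agg1.insert cl.1 (d.insert lab n)
      let best' :=
        match st.2.get? cl.1 with
        | none => st.2.insert cl.1 (n, lab)
        | some b => if b.1 < n ∨ (b.1 = n ∧ b.2 < lab) then st.2.insert cl.1 (n, lab) else st.2
      (agg', best'))
      ((PySem.Dict.empty : PySem.Dict Int (PySem.Dict String Int)),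
       (PySem.Dict.empty : PySem.Dict Int (Int × String)))
  (st.1.items.map (fun p => (p.1, p.2.items)), st.2.items.map (fun p => (p.1, p.2.2)))

-- ===== PRECONDITION & SPEC =====
def Spec_cluster_label_stats_py (assignments : List Int) (sample_labels : List String) (out : (List (Int × List (String × Int))) × (List (Int × String))) : Prop := out = cluster_label_stats_py_alt assignments sample_labels
instance (assignments : List Int) (sample_labels : List String) (out : (List (Int × List (String × Int))) × (List (Int × String))) : Decidable (Spec_cluster_label_stats_py assignments sample_labels out) := by unfold Spec_cluster_label_stats_py; infer_instance

-- ===== CLAIM (what is proved, stated in full; the proofs are below) =====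
def Claim_equal_cluster_label_stats_py : Prop := ∀ (assignments : List Int) (sample_labels : List String), Dom_cluster_label_stats_py assignments sample_labels → Spec_cluster_label_stats_py assignments sample_labels (cluster_label_stats_py assignments sample_labels)

-- ===== LEMMAS AND PROOFS =====

-- proof-side names for the loop bodies of the two ports (definitionally the ports' lambdas)
def pvAstep (agg : PySem.Dict Int (PySem.Dict String Int)) (cl : Int × String) : PySem.Dict Int (PySem.Dict String Int) :=
  let lab := if cl.2 = "" then "" else cl.2
  let agg1 := agg.setdefault cl.1 PySem.Dict.empty
  let d := (agg1.get? cl.1).getD PySem.Dict.empty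
  agg1.insert cl.1 (d.insert lab (d.getD lab 0 + 1))

def pvBestStep (agg : PySem.Dict Int (PySem.Dict String Int)) (best : PySem.Dict Int (Int × String)) (cl : Int × String) : PySem.Dict Int (Int × String) :=
  let lab := if cl.2 = "" then "" else cl.2
  let agg1 := agg.setdefault cl.1 PySem.Dict.empty
  let d := (agg1.get? cl.1).getD PySem.Dict.empty
  let n := d.getD lab 0 + 1
  match best.get? cl.1 with
  | none => best.insert cl.1 (n, lab)
  | some b => if b.1 < n ∨ (b.1 = n ∧ b.2 < lab) then best.insert cl.1 (n, lab) else best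

def pvTopVal (d : PySem.Dict String Int) : String :=
  if d.items = [] then ""
  else ((PySem.List.max2? d.items (fun kv => kv.2) (fun kv => kv.1)).getD ("", 0)).1

-- the best item of an inner count dict, as B stores it: (count, label)
def pvBestOf (d : PySem.Dict String Int) : Int × String :=
  match PySem.List.max2? d.items (fun kv => kv.2) (fun kv => kv.1) with
  | some kv => (kv.2, kv.1)
  | none => (0, "")

-- "b is a maximal item of xs under the key (count, then label)"
def pvIsBest (xs : List (String × Int)) (b : Int × String) : Prop :=
  (b.2, b.1) ∈ xs ∧ ∀ p ∈ xs, toLex ((p.2, p.1) : Int × String) ≤ toLex b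

lemma pvIsBest_unique {xs : List (String × Int)} {b b' : Int × String}
    (h : pvIsBest xs b) (h' : pvIsBest xs b') : b = b' := by
  obtain ⟨hm, hall⟩ := h
  obtain ⟨hm', hall'⟩ := h'
  have h1 := hall _ hm'
  have h2 := hall' _ hm
  simp only [] at h1 h2
  have : toLex b = toLex b' := le_antisymm h2 h1
  exact toLex_inj.mp this

-- the loop body of PySem.List.max2? with these two keys (definitionally)
def pvStep (acc : Option (String × Int)) (x : String × Int) : Option (String × Int) :=
  match acc with
  | none => some x
  | some m =>
    if (decide (m.2 < x.2) || !decide (x.2 < m.2) && decide (m.1 < x.1)) = true then some x else some m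

lemma pvMax2?_eq (xs : List (String × Int)) :
    PySem.List.max2? xs (fun kv => kv.2) (fun kv => kv.1) = xs.foldl pvStep none := by
  unfold PySem.List.max2?
  congr 1
  funext acc x
  cases acc with
  | none => rfl
  | some m =>
    unfold pvStep
    congr 1

lemma pvCond_iff (m x : String × Int) :
    (decide (m.2 < x.2) || !decide (x.2 < m.2) && decide (m.1 < x.1)) = true ↔
      toLex ((m.2, m.1) : Int × String) < toLex ((x.2, x.1) : Int × String) := by
  rw [Prod.Lex.lt_iff]
  simp only [Bool.or_eq_true, Bool.and_eq_true, Bool.not_eq_true', decide_eq_true_eq,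
    decide_eq_false_iff_not, ofLex_toLex]
  constructor
  · rintro (h | ⟨h1, h2⟩)
    · exact Or.inl h
    · rcases lt_trichotomy m.2 x.2 with h3 | h3 | h3
      · exact Or.inl h3
      · exact Or.inr ⟨h3, h2⟩
      · exact absurd h3 h1
  · rintro (h | ⟨h1, h2⟩)
    · exact Or.inl h
    · exact Or.inr ⟨by rw [h1]; exact lt_irrefl _, h2⟩

lemma pvFold_aux (xs : List (String × Int)) :
    ∀ m : String × Int, ∃ m', xs.foldl pvStep (some m) = some m' ∧ (m' = m ∨ m' ∈ xs) ∧
      toLex ((m.2, m.1) : Int × String) ≤ toLex ((m'.2, m'.1) : Int × String) ∧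
      ∀ p ∈ xs, toLex ((p.2, p.1) : Int × String) ≤ toLex ((m'.2, m'.1) : Int × String) := by
  induction xs with
  | nil => intro m; exact ⟨m, rfl, Or.inl rfl, le_refl _, by simp⟩
  | cons x t ih =>
    intro m
    by_cases hc : (decide (m.2 < x.2) || !decide (x.2 < m.2) && decide (m.1 < x.1)) = true
    · obtain ⟨m', h1, h2, h3, h4⟩ := ih x
      refine ⟨m', ?_, ?_, ?_, ?_⟩
      · have hx : pvStep (some m) x = some x := by unfold pvStep; exact if_pos hc
        rw [List.foldl_cons, hx]; exact h1
      · rcases h2 with h2 | h2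
        · exact Or.inr (by simp [h2])
        · exact Or.inr (List.mem_cons_of_mem _ h2)
      · exact le_trans (le_of_lt ((pvCond_iff m x).mp hc)) h3
      · intro p hp
        rcases List.mem_cons.mp hp with hp | hp
        · subst hp; exact h3
        · exact h4 p hp
    · obtain ⟨m', h1, h2, h3, h4⟩ := ih m
      refine ⟨m', ?_, ?_, h3, ?_⟩
      · have hx : pvStep (some m) x = some m := by unfold pvStep; exact if_neg hc
        rw [List.foldl_cons, hx]; exact h1
      · rcases h2 with h2 | h2
        · exact Or.inl h2
        · exact Or.inr (List.mem_cons_of_mem _ h2)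
      · intro p hp
        rcases List.mem_cons.mp hp with hp | hp
        · subst hp
          have hnlt : ¬ toLex ((m.2, m.1) : Int × String) < toLex ((p.2, p.1) : Int × String) :=
            fun h => hc ((pvCond_iff m p).mpr h)
          exact le_trans (not_lt.mp hnlt) h3
        · exact h4 p hp

lemma pvMax2?_isBest {xs : List (String × Int)} (h : xs ≠ []) :
    ∃ kv, PySem.List.max2? xs (fun kv => kv.2) (fun kv => kv.1) = some kv ∧ pvIsBest xs (kv.2, kv.1) := by
  rw [pvMax2?_eq]
  cases xs with
  | nil => exact absurd rfl h
  | cons x t =>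
    obtain ⟨m', h1, h2, h3, h4⟩ := pvFold_aux t x
    refine ⟨m', ?_, ?_, ?_⟩
    · rw [List.foldl_cons]; exact h1
    · rcases h2 with h2 | h2
      · simp [h2]
      · exact List.mem_cons_of_mem _ h2
    · intro p hp
      rcases List.mem_cons.mp hp with hp | hp
      · subst hp; exact h3
      · exact h4 p hp

lemma pvBestOf_eq_of_isBest {d : PySem.Dict String Int} {b : Int × String}
    (hne : d.items ≠ []) (hb : pvIsBest d.items b) : pvBestOf d = b := by
  obtain ⟨kv, hkv, hkvb⟩ := pvMax2?_isBest hne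
  unfold pvBestOf
  rw [hkv]
  exact pvIsBest_unique hkvb hb

lemma pvNodupVal {κ ν : Type} [BEq κ] [LawfulBEq κ] {d : PySem.Dict κ ν} (hnd : d.keys.Nodup)
    {k : κ} {v w : ν} (h1 : (k, v) ∈ d.items) (h2 : (k, w) ∈ d.items) : v = w := by
  have e1 := (PySem.Dict.get?_eq_some_iff_mem_items d k v hnd).mpr h1
  have e2 := (PySem.Dict.get?_eq_some_iff_mem_items d k w hnd).mpr h2
  rw [e1] at e2
  exact Option.some.inj e2

lemma pvIsBest_insert {d : PySem.Dict String Int} (hn : d.keys.Nodup) (lab : String)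
    {b : Int × String} (hb : pvIsBest d.items b) :
    pvIsBest (d.insert lab (d.getD lab 0 + 1)).items
      (if toLex b < toLex ((d.getD lab 0 + 1, lab) : Int × String) then (d.getD lab 0 + 1, lab) else b) := by
  obtain ⟨hmem, hall⟩ := hb
  set n : Int := d.getD lab 0 + 1 with hn_def
  by_cases hc : d.contains lab = true
  · -- the entry (lab, d.getD lab 0) is in the items and gets replaced by (lab, n)
    have hglab : d.get? lab = some (d.getD lab 0) := by
      rw [PySem.Dict.contains_eq_isSome_get?] at hc
      obtain ⟨v, hv⟩ := Option.isSome_iff_exists.mp hc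
      rw [hv, PySem.Dict.getD_of_get?_eq_some d 0 hv]
    have hlabmem : (lab, d.getD lab 0) ∈ d.items :=
      (PySem.Dict.get?_eq_some_iff_mem_items d lab _ hn).mp hglab
    rw [PySem.Dict.items_insert_of_contains d n hc]
    by_cases hlt : toLex b < toLex ((n, lab) : Int × String)
    · rw [if_pos hlt]
      constructor
      · exact List.mem_map.mpr ⟨(lab, d.getD lab 0), hlabmem, by simp⟩
      · intro p hp
        obtain ⟨q, hq, hqe⟩ := List.mem_map.mp hp
        by_cases hqc : (q.1 == lab) = true
        · rw [if_pos hqc] at hqe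
          subst hqe; exact le_refl _
        · rw [if_neg hqc] at hqe
          subst hqe; exact le_trans (hall q hq) (le_of_lt hlt)
    · rw [if_neg hlt]
      have hbne : b.2 ≠ lab := by
        intro he
        have hbv : b.1 = d.getD lab 0 := pvNodupVal hn (he ▸ hmem) hlabmem
        apply hlt
        rw [Prod.Lex.lt_iff]
        exact Or.inl (by simp [ofLex_toLex, hbv]; omega)
      constructor
      · refine List.mem_map.mpr ⟨(b.2, b.1), hmem, ?_⟩
        rw [if_neg (by simpa using hbne)]
      · intro p hp
        obtain ⟨q, hq, hqe⟩ := List.mem_map.mp hp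
        by_cases hqc : (q.1 == lab) = true
        · rw [if_pos hqc] at hqe
          subst hqe
          exact not_lt.mp hlt
        · rw [if_neg hqc] at hqe
          subst hqe; exact hall q hq
  · -- fresh label: items gain (lab, n) at the end
    have hc' : d.contains lab = false := by simpa using hc
    rw [PySem.Dict.items_insert_of_not_contains d n hc']
    by_cases hlt : toLex b < toLex ((n, lab) : Int × String)
    · rw [if_pos hlt]
      constructor
      · exact List.mem_append.mpr (Or.inr (by simp))
      · intro p hp
        rcases List.mem_append.mp hp with hp | hp
        · exact le_trans (hall p hp) (le_of_lt hlt)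
        · simp only [List.mem_singleton] at hp
          subst hp; exact le_refl _
    · rw [if_neg hlt]
      constructor
      · exact List.mem_append.mpr (Or.inl hmem)
      · intro p hp
        rcases List.mem_append.mp hp with hp | hp
        · exact hall p hp
        · simp only [List.mem_singleton] at hp
          subst hp; exact not_lt.mp hlt

lemma pvItems_insert_ne_nil {κ ν : Type} [BEq κ] [LawfulBEq κ] (d : PySem.Dict κ ν) (k : κ) (v : ν) :
    (d.insert k v).items ≠ [] := by
  by_cases hc : d.contains k = true
  · rw [PySem.Dict.items_insert_of_contains d v hc]
    intro h
    rw [List.map_eq_nil_iff] at h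
    rw [PySem.Dict.contains_iff_mem_keys] at hc
    simp only [PySem.Dict.keys, h, List.map_nil, List.not_mem_nil] at hc
  · rw [PySem.Dict.items_insert_of_not_contains d v (by simpa using hc)]
    simp

-- the invariant tying B's running best dict to A's count dict
def pvInv (agg : PySem.Dict Int (PySem.Dict String Int)) (best : PySem.Dict Int (Int × String)) : Prop :=
  agg.keys.Nodup ∧ (∀ p ∈ agg.items, p.2.keys.Nodup ∧ p.2.items ≠ []) ∧
  best.items = agg.items.map (fun p => (p.1, pvBestOf p.2))

lemma pvAstep_eq (agg : PySem.Dict Int (PySem.Dict String Int)) (cl : Int × String) :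
    pvAstep agg cl = agg.insert cl.1
      (((agg.get? cl.1).getD PySem.Dict.empty).insert (if cl.2 = "" then "" else cl.2)
        (((agg.get? cl.1).getD PySem.Dict.empty).getD (if cl.2 = "" then "" else cl.2) 0 + 1)) := by
  unfold pvAstep
  by_cases hc : agg.contains cl.1 = true
  · rw [PySem.Dict.setdefault_of_contains _ _ hc]
  · have hc' : agg.contains cl.1 = false := by simpa using hc
    rw [PySem.Dict.setdefault_of_not_contains _ _ hc',
        (PySem.Dict.get?_eq_none_iff_contains agg cl.1).mpr hc']
    simp [PySem.Dict.get?_insert_self, PySem.Dict.insert_insert_self]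

lemma pvBestStep_eq (agg : PySem.Dict Int (PySem.Dict String Int))
    (best : PySem.Dict Int (Int × String)) (cl : Int × String) :
    pvBestStep agg best cl =
      (match best.get? cl.1 with
       | none => best.insert cl.1
           ((((agg.get? cl.1).getD PySem.Dict.empty).getD (if cl.2 = "" then "" else cl.2) 0 + 1),
            (if cl.2 = "" then "" else cl.2))
       | some b =>
         if b.1 < ((agg.get? cl.1).getD PySem.Dict.empty).getD (if cl.2 = "" then "" else cl.2) 0 + 1 ∨
            (b.1 = ((agg.get? cl.1).getD PySem.Dict.empty).getD (if cl.2 = "" then "" else cl.2) 0 + 1 ∧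
             b.2 < (if cl.2 = "" then "" else cl.2)) then
           best.insert cl.1
             ((((agg.get? cl.1).getD PySem.Dict.empty).getD (if cl.2 = "" then "" else cl.2) 0 + 1),
              (if cl.2 = "" then "" else cl.2))
         else best) := by
  unfold pvBestStep
  simp only [PySem.Dict.get?_setdefault_self, Option.getD_some]

lemma pvBestOf_single (lab : String) : pvBestOf (PySem.Dict.empty.insert lab 1) = (1, lab) := rfl

lemma pvInv_step {agg best} (cl : Int × String) (h : pvInv agg best) :
    pvInv (pvAstep agg cl) (pvBestStep agg best cl) := by
  obtain ⟨hnd, hinner, hbest⟩ := h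
  have hbkeys : best.keys = agg.keys := by
    simp only [PySem.Dict.keys, hbest, List.map_map]; rfl
  have hbnd : best.keys.Nodup := hbkeys ▸ hnd
  rw [pvAstep_eq, pvBestStep_eq]
  by_cases hc : agg.contains cl.1 = true
  · -- cluster already present
    obtain ⟨v, hv⟩ : ∃ v, agg.get? cl.1 = some v := by
      rw [PySem.Dict.contains_eq_isSome_get?] at hc
      exact Option.isSome_iff_exists.mp hc
    rw [hv]
    simp only [Option.getD_some]
    have hmemi : (cl.1, v) ∈ agg.items := (PySem.Dict.get?_eq_some_iff_mem_items agg _ v hnd).mp hv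
    have hvprops := hinner _ hmemi
    have hbOf : pvIsBest v.items (pvBestOf v) := by
      obtain ⟨kv, hkv, hkvb⟩ := pvMax2?_isBest hvprops.2
      unfold pvBestOf; rw [hkv]; exact hkvb
    have hbget : best.get? cl.1 = some (pvBestOf v) := by
      refine (PySem.Dict.get?_eq_some_iff_mem_items best _ _ hbnd).mpr ?_
      rw [hbest]; exact List.mem_map.mpr ⟨(cl.1, v), hmemi, rfl⟩
    rw [hbget]
    have hbc : best.contains cl.1 = true := by
      rw [PySem.Dict.contains_eq_isSome_get?, hbget]; rfl
    have hIns := pvIsBest_insert hvprops.1 (if cl.2 = "" then "" else cl.2) hbOf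
    have hInsOf := pvBestOf_eq_of_isBest (pvItems_insert_ne_nil v _ _) hIns
    have hcond_iff : ((pvBestOf v).1 < v.getD (if cl.2 = "" then "" else cl.2) 0 + 1 ∨
        ((pvBestOf v).1 = v.getD (if cl.2 = "" then "" else cl.2) 0 + 1 ∧
         (pvBestOf v).2 < (if cl.2 = "" then "" else cl.2))) ↔
        toLex (pvBestOf v) <
          toLex ((v.getD (if cl.2 = "" then "" else cl.2) 0 + 1, (if cl.2 = "" then "" else cl.2)) : Int × String) := by
      rw [Prod.Lex.lt_iff]; simp
    by_cases hlt : toLex (pvBestOf v) <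
        toLex ((v.getD (if cl.2 = "" then "" else cl.2) 0 + 1, (if cl.2 = "" then "" else cl.2)) : Int × String)
    · rw [if_pos hlt] at hInsOf
      simp only [if_pos (hcond_iff.mpr hlt)]
      refine ⟨?_, ?_, ?_⟩
      · rw [PySem.Dict.keys_insert_of_contains agg _ hc]; exact hnd
      · intro p hp
        rw [PySem.Dict.items_insert_of_contains agg _ hc] at hp
        obtain ⟨q, hq, he⟩ := List.mem_map.mp hp
        by_cases hqc : (q.1 == cl.1) = true
        · rw [if_pos hqc] at he; subst he
          exact ⟨PySem.Dict.nodup_keys_insert v _ _ hvprops.1, pvItems_insert_ne_nil v _ _⟩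
        · rw [if_neg hqc] at he; subst he; exact hinner q hq
      · rw [PySem.Dict.items_insert_of_contains best _ hbc,
            PySem.Dict.items_insert_of_contains agg _ hc, hbest, List.map_map, List.map_map]
        refine List.map_congr_left ?_
        intro p hp
        simp only [Function.comp_apply]
        by_cases hpc : (p.1 == cl.1) = true
        · simp only [if_pos hpc, hInsOf]
        · simp only [if_neg hpc]
    · rw [if_neg hlt] at hInsOf
      simp only [if_neg (fun hco => hlt (hcond_iff.mp hco))]
      refine ⟨?_, ?_, ?_⟩
      · rw [PySem.Dict.keys_insert_of_contains agg _ hc]; exact hnd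
      · intro p hp
        rw [PySem.Dict.items_insert_of_contains agg _ hc] at hp
        obtain ⟨q, hq, he⟩ := List.mem_map.mp hp
        by_cases hqc : (q.1 == cl.1) = true
        · rw [if_pos hqc] at he; subst he
          exact ⟨PySem.Dict.nodup_keys_insert v _ _ hvprops.1, pvItems_insert_ne_nil v _ _⟩
        · rw [if_neg hqc] at he; subst he; exact hinner q hq
      · rw [PySem.Dict.items_insert_of_contains agg _ hc, hbest, List.map_map]
        refine List.map_congr_left ?_
        intro p hp
        simp only [Function.comp_apply]
        by_cases hpc : (p.1 == cl.1) = true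
        · have hp1 : p.1 = cl.1 := by simpa using hpc
          have hpmem : (cl.1, p.2) ∈ agg.items := by rw [← hp1]; exact hp
          have hpd : p.2 = v := pvNodupVal hnd hpmem hmemi
          simp [hInsOf, hpd, hp1]
        · simp only [if_neg hpc]
  · -- new cluster
    have hc' : agg.contains cl.1 = false := by simpa using hc
    have hgd : agg.get? cl.1 = none := (PySem.Dict.get?_eq_none_iff_contains agg cl.1).mpr hc'
    have hbc : best.contains cl.1 = false := by
      rw [← Bool.not_eq_true, PySem.Dict.contains_iff_mem_keys, hbkeys,
          ← PySem.Dict.contains_iff_mem_keys, hc']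
      simp
    have hbget : best.get? cl.1 = none := (PySem.Dict.get?_eq_none_iff_contains best cl.1).mpr hbc
    rw [hgd, hbget]
    simp only [Option.getD_none, PySem.Dict.getD_empty, zero_add]
    refine ⟨?_, ?_, ?_⟩
    · exact PySem.Dict.nodup_keys_insert agg _ _ hnd
    · intro p hp
      rw [PySem.Dict.items_insert_of_not_contains agg _ hc'] at hp
      rcases List.mem_append.mp hp with hp | hp
      · exact hinner p hp
      · simp only [List.mem_singleton] at hp
        subst hp
        exact ⟨PySem.Dict.nodup_keys_insert _ _ _ PySem.Dict.nodup_keys_empty,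
               pvItems_insert_ne_nil _ _ _⟩
    · rw [PySem.Dict.items_insert_of_not_contains best _ hbc,
          PySem.Dict.items_insert_of_not_contains agg _ hc', List.map_append, hbest]
      simp only [List.map_cons, List.map_nil, pvBestOf_single]

lemma pvInv_fold (l : List (Int × String)) :
    ∀ agg best, pvInv agg best →
      pvInv (l.foldl pvAstep agg)
        (l.foldl (fun st cl => (pvAstep st.1 cl, pvBestStep st.1 st.2 cl)) (agg, best)).2 ∧
      (l.foldl (fun st cl => (pvAstep st.1 cl, pvBestStep st.1 st.2 cl)) (agg, best)).1 = l.foldl pvAstep agg := by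
  induction l with
  | nil => intro agg best h; exact ⟨h, rfl⟩
  | cons x t ih =>
    intro agg best h
    simpa [List.foldl_cons] using ih (pvAstep agg x) (pvBestStep agg best x) (pvInv_step x h)

lemma pvTopVal_eq {d : PySem.Dict String Int} (h : d.items ≠ []) : pvTopVal d = (pvBestOf d).2 := by
  obtain ⟨kv, hkv, _⟩ := pvMax2?_isBest h
  unfold pvTopVal pvBestOf
  rw [if_neg h, hkv]
  rfl

lemma pvPortA_eq (a : List Int) (s : List String) :
    cluster_label_stats_py a s =
      (let agg := (a.zip s).foldl pvAstep PySem.Dict.empty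
       let top := agg.items.foldl (fun t p => t.insert p.1 (pvTopVal p.2)) PySem.Dict.empty
       (agg.items.map (fun p => (p.1, p.2.items)), top.items)) := rfl

lemma pvPortB_eq (a : List Int) (s : List String) :
    cluster_label_stats_py_alt a s =
      (let st := (a.zip s).foldl (fun st cl => (pvAstep st.1 cl, pvBestStep st.1 st.2 cl))
        ((PySem.Dict.empty : PySem.Dict Int (PySem.Dict String Int)),
         (PySem.Dict.empty : PySem.Dict Int (Int × String)))
       (st.1.items.map (fun p => (p.1, p.2.items)), st.2.items.map (fun p => (p.1, p.2.2)))) := rfl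

-- ===== VERDICT (by name: the statement is the Claim_ definition above) =====
theorem cluster_label_stats_py_spec : Claim_equal_cluster_label_stats_py := by
  intro a s _
  unfold Spec_cluster_label_stats_py
  rw [pvPortA_eq, pvPortB_eq]
  obtain ⟨hInv, hfst⟩ := pvInv_fold (a.zip s) PySem.Dict.empty PySem.Dict.empty
    ⟨PySem.Dict.nodup_keys_empty, by simp [PySem.Dict.empty], by simp [PySem.Dict.empty]⟩
  obtain ⟨hnd, hinner, hbest⟩ := hInv
  simp only []
  rw [hfst]
  refine Prod.ext rfl ?_
  have hfresh : ∀ p ∈ ((a.zip s).foldl pvAstep PySem.Dict.empty).items,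
      (PySem.Dict.empty : PySem.Dict Int String).contains p.1 = false := by
    intro p _; exact PySem.Dict.contains_empty p.1
  have hkn : (((a.zip s).foldl pvAstep PySem.Dict.empty).items.map (fun p => p.1)).Nodup := by
    simpa [PySem.Dict.keys] using hnd
  rw [PySem.Dict.items_foldl_insert_fresh _ _ _ _ hfresh hkn, hbest, List.map_map]
  refine List.map_congr_left ?_
  intro p hp
  simp only [Function.comp_apply]
  rw [pvTopVal_eq (hinner p hp).2]
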